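-- pv_equiv track=rewrite | github.com/ffdumont/nav-profile | navpro/core/flight_analyzer.py | _categorize_airspaces
-- ===== SOURCE A (Python) =====
-- from typing import Dict, List, Tuple, Optional
--
-- def _categorize_airspaces(airspaces: Dict) -> Dict[str, List[Dict]]:
--     """Categorize airspaces by type"""
--     categories = {
--         'TMAs': [],
--         'RAS': [],
--         'Restricted': [],
--         'Control_Zones': [],
--         'Other': []
--     }
--
--     for airspace in airspaces.values():
--         code_type = airspace.get('code_type', 'Unknown')
--
--         if code_type == 'TMA':
--             categories['TMAs'].append(airspace)
--         elif code_type == 'RAS':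
--             categories['RAS'].append(airspace)
--         elif code_type in ['R', 'P']:
--             categories['Restricted'].append(airspace)
--         elif code_type == 'CTR':
--             categories['Control_Zones'].append(airspace)
--         else:
--             categories['Other'].append(airspace)
--
--     # Sort each category by name
--     for category in categories.values():
--         category.sort(key=lambda x: x.get('name', ''))
--
--     return categories
-- ===== SOURCE B (Python) =====
-- def _categorize_airspaces(airspaces):
--     """Categorize airspaces by type: one global stable sort by name, then a single
--     categorizing pass (each bucket inherits name order from the stable sort)."""
--     categories = {
--         'TMAs': [],
--         'RAS': [],
--         'Restricted': [],
--         'Control_Zones': [],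
--         'Other': []
--     }
--
--     for airspace in sorted(airspaces.values(), key=lambda x: x.get('name', '')):
--         code_type = airspace.get('code_type', 'Unknown')
--         if code_type == 'TMA':
--             key = 'TMAs'
--         elif code_type == 'RAS':
--             key = 'RAS'
--         elif code_type in ['R', 'P']:
--             key = 'Restricted'
--         elif code_type == 'CTR':
--             key = 'Control_Zones'
--         else:
--             key = 'Other'
--         categories[key].append(airspace)
--
--     return categories
-- ===== Notes on version B (the rewrite author's own statement) =====
-- stated objective: alternative
-- what changed: Replaces A's categorize-then-sort-each-of-five-buckets with one global stable sort by name followed by a single categorizing pass that only appends (per-bucket sorts disappear; stability makes each bucket come out in name order).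
import Mathlib
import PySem

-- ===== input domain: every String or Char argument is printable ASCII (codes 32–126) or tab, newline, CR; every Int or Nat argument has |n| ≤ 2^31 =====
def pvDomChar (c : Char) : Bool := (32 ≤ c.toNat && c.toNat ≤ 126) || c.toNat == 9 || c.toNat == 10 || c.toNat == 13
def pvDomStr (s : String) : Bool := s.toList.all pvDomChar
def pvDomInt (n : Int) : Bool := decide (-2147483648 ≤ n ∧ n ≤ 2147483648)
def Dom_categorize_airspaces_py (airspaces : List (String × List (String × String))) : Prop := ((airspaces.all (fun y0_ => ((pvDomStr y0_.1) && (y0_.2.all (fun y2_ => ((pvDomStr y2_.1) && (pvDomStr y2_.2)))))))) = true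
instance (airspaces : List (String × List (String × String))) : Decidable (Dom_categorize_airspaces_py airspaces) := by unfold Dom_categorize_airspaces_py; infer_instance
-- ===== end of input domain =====

-- B replaces A's categorize-then-sort-each-bucket with one global stable sort by name
-- followed by a single categorizing pass (objective: alternative decomposition, same cost).

-- shared primitive: Python dict.get(k, default) on an association list (first match)
def pvGetD : List (String × String) → String → String → String
  | [], _, d => d
  | (k', v) :: rest, k, d => if k' == k then v else pvGetD rest k d

-- the sort key: lambda x: x.get('name', '')
def pvKey (x : List (String × String)) : String := pvGetD x "name" ""

-- ===== PORT A =====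
def categorize_airspaces_py (airspaces : List (String × List (String × String))) : List (String × List (List (String × String))) :=
  let c := (PySem.Dict.ofList airspaces).values.foldl (fun acc x =>
    let ct := pvGetD x "code_type" "Unknown"
    if ct == "TMA" then (acc.1 ++ [x], acc.2.1, acc.2.2.1, acc.2.2.2.1, acc.2.2.2.2)
    else if ct == "RAS" then (acc.1, acc.2.1 ++ [x], acc.2.2.1, acc.2.2.2.1, acc.2.2.2.2)
    else if ct == "R" || ct == "P" then (acc.1, acc.2.1, acc.2.2.1 ++ [x], acc.2.2.2.1, acc.2.2.2.2)
    else if ct == "CTR" then (acc.1, acc.2.1, acc.2.2.1, acc.2.2.2.1 ++ [x], acc.2.2.2.2)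
    else (acc.1, acc.2.1, acc.2.2.1, acc.2.2.2.1, acc.2.2.2.2 ++ [x]))
    (([], [], [], [], []) : List (List (String × String)) × List (List (String × String)) × List (List (String × String)) × List (List (String × String)) × List (List (String × String)))
  [("TMAs", PySem.List.sorted c.1 pvKey), ("RAS", PySem.List.sorted c.2.1 pvKey),
   ("Restricted", PySem.List.sorted c.2.2.1 pvKey), ("Control_Zones", PySem.List.sorted c.2.2.2.1 pvKey),
   ("Other", PySem.List.sorted c.2.2.2.2 pvKey)]

-- ===== PORT B =====
-- Source B's if/elif chain picks which bucket (0..4) gets the append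
def pvCat (x : List (String × String)) : Nat :=
  let ct := pvGetD x "code_type" "Unknown"
  if ct == "TMA" then 0
  else if ct == "RAS" then 1
  else if ct == "R" || ct == "P" then 2
  else if ct == "CTR" then 3
  else 4

-- categories[key].append(x)
def pvBump (i : Nat) (x : List (String × String))
    (acc : List (List (String × String)) × List (List (String × String)) × List (List (String × String)) × List (List (String × String)) × List (List (String × String))) :
    List (List (String × String)) × List (List (String × String)) × List (List (String × String)) × List (List (String × String)) × List (List (String × String)) :=
  (if i == 0 then acc.1 ++ [x] else acc.1,
   if i == 1 then acc.2.1 ++ [x] else acc.2.1,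
   if i == 2 then acc.2.2.1 ++ [x] else acc.2.2.1,
   if i == 3 then acc.2.2.2.1 ++ [x] else acc.2.2.2.1,
   if i == 4 then acc.2.2.2.2 ++ [x] else acc.2.2.2.2)

def categorize_airspaces_py_alt (airspaces : List (String × List (String × String))) : List (String × List (List (String × String))) :=
  let vs := PySem.List.sorted (PySem.Dict.ofList airspaces).values pvKey
  let c := vs.foldl (fun acc x => pvBump (pvCat x) x acc)
    (([], [], [], [], []) : List (List (String × String)) × List (List (String × String)) × List (List (String × String)) × List (List (String × String)) × List (List (String × String)))
  [("TMAs", c.1), ("RAS", c.2.1), ("Restricted", c.2.2.1), ("Control_Zones", c.2.2.2.1), ("Other", c.2.2.2.2)]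

-- ===== PRECONDITION & SPEC =====
def Spec_categorize_airspaces_py (airspaces : List (String × List (String × String))) (out : List (String × List (List (String × String)))) : Prop := out = categorize_airspaces_py_alt airspaces
instance (airspaces : List (String × List (String × String))) (out : List (String × List (List (String × String)))) : Decidable (Spec_categorize_airspaces_py airspaces out) := by unfold Spec_categorize_airspaces_py; infer_instance

-- ===== CLAIM (what is proved, stated in full; the proofs are below) =====
def Claim_equal_categorize_airspaces_py : Prop := ∀ (airspaces : List (String × List (String × String))), Dom_categorize_airspaces_py airspaces → Spec_categorize_airspaces_py airspaces (categorize_airspaces_py airspaces)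

-- ===== LEMMAS AND PROOFS =====

-- stable insertion into a key-sorted list commutes with filtering
theorem pv_filter_insertBy {α κ : Type} [LinearOrder κ] (key : α → κ) (p : α → Bool) (x : α)
    (acc : List α) (hacc : acc.Pairwise (fun a b => key a ≤ key b)) :
    (PySem.List.insertBy (fun a b => decide (key a < key b)) x acc).filter p
      = if p x then PySem.List.insertBy (fun a b => decide (key a < key b)) x (acc.filter p)
        else acc.filter p := by
  induction acc with
  | nil => simp [PySem.List.insertBy]; by_cases h : p x <;> simp [h]
  | cons y ys ih =>
    rcases List.pairwise_cons.mp hacc with ⟨hy, hys⟩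
    by_cases hlt : key x < key y
    · -- x is inserted in front
      by_cases hx : p x
      · by_cases hpy : p y
        · simp [PySem.List.insertBy, hlt, hx, hpy]
        · -- y filtered out; x still goes to the front of filter p ys
          simp only [PySem.List.insertBy, hlt, decide_true, if_true, List.filter_cons, hx, hpy,
            Bool.false_eq_true, if_false, if_true]
          cases hfy : ys.filter p with
          | nil => simp [PySem.List.insertBy]
          | cons z zs =>
            have hz : z ∈ ys := List.mem_of_mem_filter (hfy ▸ List.mem_cons_self ..)
            have : key x < key z := lt_of_lt_of_le hlt (hy z hz)
            simp [PySem.List.insertBy, this]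
      · simp [PySem.List.insertBy, hlt, hx]
    · -- insertBy recurses past y
      have hstep : PySem.List.insertBy (fun a b => decide (key a < key b)) x (y :: ys)
          = y :: PySem.List.insertBy (fun a b => decide (key a < key b)) x ys := by
        simp [PySem.List.insertBy, hlt]
      rw [hstep]
      by_cases hpy : p y
      · simp only [List.filter_cons, hpy, if_true, ih hys]
        by_cases hx : p x
        · simp [hx, PySem.List.insertBy, hlt]
        · simp [hx]
      · simp [hpy, ih hys]

-- stable insertion preserves key-sortedness
theorem pv_insertBy_pairwise {α κ : Type} [LinearOrder κ] (key : α → κ) (x : α)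
    (acc : List α) (hacc : acc.Pairwise (fun a b => key a ≤ key b)) :
    (PySem.List.insertBy (fun a b => decide (key a < key b)) x acc).Pairwise
      (fun a b => key a ≤ key b) := by
  induction acc with
  | nil => simp [PySem.List.insertBy]
  | cons y ys ih =>
    rcases List.pairwise_cons.mp hacc with ⟨hy, hys⟩
    by_cases hlt : key x < key y
    · simp only [PySem.List.insertBy, hlt, decide_true, if_true]
      refine List.pairwise_cons.mpr ⟨?_, hacc⟩
      intro z hz
      rcases List.mem_cons.mp hz with rfl | hz'
      · exact le_of_lt hlt
      · exact le_trans (le_of_lt hlt) (hy z hz')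
    · simp only [PySem.List.insertBy, hlt, decide_false, Bool.false_eq_true, if_false]
      refine List.pairwise_cons.mpr ⟨?_, ih hys⟩
      intro z hz
      rcases (PySem.List.mem_insertBy _ _ _ _).mp hz with rfl | hz'
      · exact le_of_not_gt hlt
      · exact hy z hz'

-- the whole insertion sort commutes with filtering
theorem pv_filter_foldl_insertBy {α κ : Type} [LinearOrder κ] (key : α → κ) (p : α → Bool)
    (xs : List α) : ∀ (acc : List α), acc.Pairwise (fun a b => key a ≤ key b) →
    (xs.foldl (fun acc x => PySem.List.insertBy (fun a b => decide (key a < key b)) x acc) acc).filter p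
      = (xs.filter p).foldl (fun acc x => PySem.List.insertBy (fun a b => decide (key a < key b)) x acc) (acc.filter p) := by
  induction xs with
  | nil => intro acc _; simp
  | cons x xs ih =>
    intro acc hacc
    have h1 := ih (PySem.List.insertBy (fun a b => decide (key a < key b)) x acc)
      (pv_insertBy_pairwise key x acc hacc)
    by_cases hx : p x
    · simp only [List.foldl_cons, List.filter_cons, hx, if_true, h1,
        pv_filter_insertBy key p x acc hacc]
    · simp only [List.foldl_cons, List.filter_cons, hx, Bool.false_eq_true, if_false, h1,
        pv_filter_insertBy key p x acc hacc]

theorem pv_sorted_filter {α κ : Type} [LinearOrder κ] (key : α → κ) (p : α → Bool) (xs : List α) :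
    PySem.List.sorted (xs.filter p) key = (PySem.List.sorted xs key).filter p := by
  rw [PySem.List.sorted_eq_foldl_insertBy, PySem.List.sorted_eq_foldl_insertBy,
    pv_filter_foldl_insertBy key p xs [] List.Pairwise.nil]
  rfl

-- A's loop body is exactly "append into bucket pvCat x"
theorem pv_stepA_eq_bump (acc : List (List (String × String)) × List (List (String × String)) × List (List (String × String)) × List (List (String × String)) × List (List (String × String))) (x : List (String × String)) :
    (let ct := pvGetD x "code_type" "Unknown"
     if ct == "TMA" then (acc.1 ++ [x], acc.2.1, acc.2.2.1, acc.2.2.2.1, acc.2.2.2.2)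
     else if ct == "RAS" then (acc.1, acc.2.1 ++ [x], acc.2.2.1, acc.2.2.2.1, acc.2.2.2.2)
     else if ct == "R" || ct == "P" then (acc.1, acc.2.1, acc.2.2.1 ++ [x], acc.2.2.2.1, acc.2.2.2.2)
     else if ct == "CTR" then (acc.1, acc.2.1, acc.2.2.1, acc.2.2.2.1 ++ [x], acc.2.2.2.2)
     else (acc.1, acc.2.1, acc.2.2.1, acc.2.2.2.1, acc.2.2.2.2 ++ [x]))
    = pvBump (pvCat x) x acc := by
  simp only [pvCat]
  split_ifs <;> simp [pvBump]

-- pvCat only takes the five bucket values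
theorem pv_cat_cases (x : List (String × String)) :
    pvCat x = 0 ∨ pvCat x = 1 ∨ pvCat x = 2 ∨ pvCat x = 3 ∨ pvCat x = 4 := by
  unfold pvCat
  dsimp only
  split_ifs <;> simp

-- running the bucket fold over vs appends filter (pvCat = i) vs to bucket i
theorem pv_foldl_bump (vs : List (List (String × String))) :
    ∀ (acc : List (List (String × String)) × List (List (String × String)) × List (List (String × String)) × List (List (String × String)) × List (List (String × String))),
    vs.foldl (fun acc x => pvBump (pvCat x) x acc) acc
      = (acc.1 ++ vs.filter (fun x => pvCat x == 0),
         acc.2.1 ++ vs.filter (fun x => pvCat x == 1),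
         acc.2.2.1 ++ vs.filter (fun x => pvCat x == 2),
         acc.2.2.2.1 ++ vs.filter (fun x => pvCat x == 3),
         acc.2.2.2.2 ++ vs.filter (fun x => pvCat x == 4)) := by
  induction vs with
  | nil => intro acc; simp
  | cons x vs ih =>
    intro acc
    rw [List.foldl_cons, ih]
    rcases pv_cat_cases x with h | h | h | h | h <;>
      simp [pvBump, h]

-- ===== VERDICT (by name: the statement is the Claim_ definition above) =====
theorem categorize_airspaces_py_spec : Claim_equal_categorize_airspaces_py := by
  intro airspaces _
  unfold Spec_categorize_airspaces_py categorize_airspaces_py categorize_airspaces_py_alt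
  have hstep : (fun (acc : List (List (String × String)) × List (List (String × String)) × List (List (String × String)) × List (List (String × String)) × List (List (String × String))) (x : List (String × String)) =>
      let ct := pvGetD x "code_type" "Unknown"
      if ct == "TMA" then (acc.1 ++ [x], acc.2.1, acc.2.2.1, acc.2.2.2.1, acc.2.2.2.2)
      else if ct == "RAS" then (acc.1, acc.2.1 ++ [x], acc.2.2.1, acc.2.2.2.1, acc.2.2.2.2)
      else if ct == "R" || ct == "P" then (acc.1, acc.2.1, acc.2.2.1 ++ [x], acc.2.2.2.1, acc.2.2.2.2)
      else if ct == "CTR" then (acc.1, acc.2.1, acc.2.2.1, acc.2.2.2.1 ++ [x], acc.2.2.2.2)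
      else (acc.1, acc.2.1, acc.2.2.1, acc.2.2.2.1, acc.2.2.2.2 ++ [x]))
      = fun acc x => pvBump (pvCat x) x acc := by
    funext acc x
    exact pv_stepA_eq_bump acc x
  simp only [hstep, pv_foldl_bump, List.nil_append, pv_sorted_filter]
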